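-- pv_equiv track=rewrite | github.com/bengo501/Lista_projetoEotimiza-oDeAlgoritmos | solucoes/3_programacao_dinamica/ex2_calcadas.py | calcadas_sem_amarelas_consecutivas
-- ===== SOURCE A (Python) =====
-- def calcadas_sem_amarelas_consecutivas(n):
--     """
--     versao bottom-up (mais eficiente).
--     """
--     if n == 0:
--         return 1
--     if n == 1:
--         return 3
--
--     # dp[i][cor] = numero de calcadas de tamanho i terminando na cor
--     # cor: 0=verde, 1=azul, 2=amarela
--
--     dp = [[0] * 3 for _ in range(n + 1)]
--
--     # caso base: 1 pedra
--     dp[1][0] = 1  # verde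
--     dp[1][1] = 1  # azul
--     dp[1][2] = 1  # amarela
--
--     # preenche a tabela
--     for i in range(2, n + 1):
--         # verde: pode vir depois de qualquer cor
--         dp[i][0] = dp[i-1][0] + dp[i-1][1] + dp[i-1][2]
--
--         # azul: pode vir depois de qualquer cor
--         dp[i][1] = dp[i-1][0] + dp[i-1][1] + dp[i-1][2]
--
--         # amarela: pode vir depois de verde ou azul (nao amarela)
--         dp[i][2] = dp[i-1][0] + dp[i-1][1]
--
--     return dp[n][0] + dp[n][1] + dp[n][2]
-- ===== SOURCE B (Python) =====
-- def calcadas_sem_amarelas_consecutivas(n):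
--     # Counts of sidewalks satisfy the recurrence t(k) = 2*t(k-1) + 2*t(k-2).
--     # Compute t(n) as the top row of M^(n-1) applied to (3, 1), where
--     # M = [[2, 2], [1, 0]], using fast exponentiation by squaring.
--     if n == 0:
--         return 1
--     a, b, c, d = 1, 0, 0, 1      # accumulator: identity matrix
--     pa, pb, pc, pd = 2, 2, 1, 0  # M
--     k = n - 1
--     while k > 0:
--         if k & 1:
--             # acc = M_power * acc  (left-multiply keeps row meaning (t(j+1), t(j)))
--             a, b, c, d = pa*a + pb*c, pa*b + pb*d, pc*a + pd*c, pc*b + pd*d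
--         pa, pb, pc, pd = pa*pa + pb*pc, pa*pb + pb*pd, pc*pa + pd*pc, pc*pb + pd*pd
--         k >>= 1
--     return 3*a + b
-- ===== Notes on version B (the rewrite author's own statement) =====
-- stated objective: faster
-- what changed: Replaced the bottom-up three-column DP table (one row per stone) with exponentiation by squaring of the 2x2 matrix of the linear recurrence the counts satisfy, t(k) = 2*t(k-1) + 2*t(k-2); measured as roughly two orders of magnitude faster at the largest sizes both finish.
import Mathlib
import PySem

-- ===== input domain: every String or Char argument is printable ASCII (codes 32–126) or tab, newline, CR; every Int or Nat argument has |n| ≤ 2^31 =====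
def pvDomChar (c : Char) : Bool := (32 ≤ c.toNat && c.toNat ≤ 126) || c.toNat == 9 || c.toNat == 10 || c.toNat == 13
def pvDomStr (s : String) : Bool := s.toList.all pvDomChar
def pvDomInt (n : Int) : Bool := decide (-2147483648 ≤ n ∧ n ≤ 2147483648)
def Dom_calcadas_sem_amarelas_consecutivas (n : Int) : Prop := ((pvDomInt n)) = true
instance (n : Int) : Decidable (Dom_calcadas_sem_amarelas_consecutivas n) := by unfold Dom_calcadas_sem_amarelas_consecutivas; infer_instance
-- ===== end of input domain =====

-- B replaces A's bottom-up DP table by exponentiation by squaring of the 2x2 matrix of the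
-- recurrence t(k) = 2 t(k-1) + 2 t(k-2); same return value on every nonnegative input (proved below).

-- ===== PORT A =====
-- dp[i][j] read / write (indices are always in range on Pre_; Python would raise otherwise)
def pvCellA (dp : List (List Int)) (i j : Nat) : Int := (dp.getD i []).getD j 0
def pvSetA (dp : List (List Int)) (i j : Nat) (v : Int) : List (List Int) :=
  dp.set i ((dp.getD i []).set j v)

-- one iteration of the 'for i in range(2, n+1)' body: the three assignments in order
def pvStepA (dp : List (List Int)) (i : Nat) : List (List Int) :=
  let d1 := pvSetA dp i 0 (pvCellA dp (i-1) 0 + pvCellA dp (i-1) 1 + pvCellA dp (i-1) 2)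
  let d2 := pvSetA d1 i 1 (pvCellA d1 (i-1) 0 + pvCellA d1 (i-1) 1 + pvCellA d1 (i-1) 2)
  pvSetA d2 i 2 (pvCellA d2 (i-1) 0 + pvCellA d2 (i-1) 1)

def calcadas_sem_amarelas_consecutivas (n : Int) : Int :=
  if n = 0 then 1
  else if n = 1 then 3
  else
    -- dp = [[0]*3 for _ in range(n+1)]
    let dp0 : List (List Int) := List.replicate (n+1).toNat [0, 0, 0]
    -- dp[1][0] = 1; dp[1][1] = 1; dp[1][2] = 1
    let dp1 := pvSetA (pvSetA (pvSetA dp0 1 0 1) 1 1 1) 1 2 1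
    let dp := (PySem.List.pyRange 2 (n+1) 1).foldl (fun d i => pvStepA d i.toNat) dp1
    pvCellA dp n.toNat 0 + pvCellA dp n.toNat 1 + pvCellA dp n.toNat 2

-- ===== PORT B =====
structure PvM where
  a : Int
  b : Int
  c : Int
  d : Int
deriving DecidableEq, Repr

def pvMul (x y : PvM) : PvM :=
  ⟨x.a * y.a + x.b * y.c, x.a * y.b + x.b * y.d,
   x.c * y.a + x.d * y.c, x.c * y.b + x.d * y.d⟩

-- the 'while k > 0' loop of Source B (acc ← p*acc when the bit is set; p ← p*p; k ← k >> 1);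
-- fuel = k bounds the iteration count (k strictly decreases), it only makes the loop total
def pvPowLoop (fuel : Nat) (acc p : PvM) (k : Nat) : PvM :=
  match fuel with
  | 0 => acc
  | fuel + 1 =>
      if k = 0 then acc
      else pvPowLoop fuel (if k % 2 = 1 then pvMul p acc else acc) (pvMul p p) (k / 2)

def calcadas_sem_amarelas_consecutivas_alt (n : Int) : Int :=
  if n = 0 then 1
  else
    -- in Python k = n - 1 and the loop runs while k > 0; for n ≤ 0 it does not run,
    -- exactly as with the clamped (n-1).toNat here
    let k := (n - 1).toNat
    let m := pvPowLoop k ⟨1, 0, 0, 1⟩ ⟨2, 2, 1, 0⟩ k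
    3 * m.a + m.b

-- ===== PRECONDITION & SPEC =====
-- Pre_ excludes exactly the negative inputs, on which A raises IndexError (indexing a too-short table).
def Pre_calcadas_sem_amarelas_consecutivas (n : Int) : Prop := 0 ≤ n
instance (n : Int) : Decidable (Pre_calcadas_sem_amarelas_consecutivas n) := by
  unfold Pre_calcadas_sem_amarelas_consecutivas; infer_instance

def pvWitness_calcadas_sem_amarelas_consecutivas : Int := 2

def Spec_calcadas_sem_amarelas_consecutivas (n : Int) (out : Int) : Prop :=
  out = calcadas_sem_amarelas_consecutivas_alt n
instance (n : Int) (out : Int) : Decidable (Spec_calcadas_sem_amarelas_consecutivas n out) := by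
  unfold Spec_calcadas_sem_amarelas_consecutivas; infer_instance

-- ===== CLAIM (what is proved, stated in full; the proofs are below) =====
def Claim_equal_calcadas_sem_amarelas_consecutivas : Prop :=
  ∀ (n : Int), Dom_calcadas_sem_amarelas_consecutivas n →
    Pre_calcadas_sem_amarelas_consecutivas n →
    Spec_calcadas_sem_amarelas_consecutivas n (calcadas_sem_amarelas_consecutivas n)

-- ===== LEMMAS AND PROOFS =====

-- t n = the number of sidewalks of length n with no two consecutive yellows
def pvT : Nat → Int
  | 0 => 1
  | 1 => 3
  | (k+2) => 2 * pvT (k+1) + 2 * pvT k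

-- (g k, y k) = A's dp row k: (count ending green = ending blue, count ending yellow)
def pvGY : Nat → Int × Int
  | 0 => (0, 0)
  | 1 => (1, 1)
  | (k+2) => (2 * (pvGY (k+1)).1 + (pvGY (k+1)).2, 2 * (pvGY (k+1)).1)

def pvI : PvM := ⟨1, 0, 0, 1⟩
def pvMM : PvM := ⟨2, 2, 1, 0⟩

def pvPw (p : PvM) : Nat → PvM
  | 0 => pvI
  | (m+1) => pvMul p (pvPw p m)

theorem pvMul_assoc (x y z : PvM) : pvMul (pvMul x y) z = pvMul x (pvMul y z) := by
  cases x; cases y; cases z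
  simp only [pvMul, PvM.mk.injEq]
  refine ⟨by ring, by ring, by ring, by ring⟩

theorem pvMul_I (x : PvM) : pvMul x pvI = x := by
  cases x; simp [pvMul, pvI]

theorem pvI_mul (x : PvM) : pvMul pvI x = x := by
  cases x; simp [pvMul, pvI]

theorem pvPw_mul (p : PvM) (m : Nat) : pvMul (pvPw p m) p = pvPw p (m+1) := by
  induction m with
  | zero => simp [pvPw, pvMul_I, pvI_mul]
  | succ m ih =>
      calc pvMul (pvPw p (m+1)) p = pvMul (pvMul p (pvPw p m)) p := rfl
        _ = pvMul p (pvMul (pvPw p m) p) := pvMul_assoc ..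
        _ = pvMul p (pvPw p (m+1)) := by rw [ih]
        _ = pvPw p (m+2) := rfl

theorem pvPw_sq (p : PvM) (m : Nat) : pvPw (pvMul p p) m = pvPw p (2*m) := by
  induction m with
  | zero => rfl
  | succ m ih =>
      have h2 : 2 * (m+1) = (2*m + 1) + 1 := by ring
      calc pvPw (pvMul p p) (m+1) = pvMul (pvMul p p) (pvPw (pvMul p p) m) := rfl
        _ = pvMul (pvMul p p) (pvPw p (2*m)) := by rw [ih]
        _ = pvMul p (pvMul p (pvPw p (2*m))) := pvMul_assoc ..
        _ = pvMul p (pvPw p (2*m + 1)) := rfl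
        _ = pvPw p (2*(m+1)) := by rw [h2]; rfl

theorem pvPowLoop_eq (fuel : Nat) : ∀ k, k ≤ fuel → ∀ acc p : PvM,
    pvPowLoop fuel acc p k = pvMul (pvPw p k) acc := by
  induction fuel with
  | zero =>
      intro k hk acc p
      have : k = 0 := by omega
      subst this
      simp [pvPowLoop, pvPw, pvI_mul]
  | succ fuel ih =>
      intro k hk acc p
      by_cases hk0 : k = 0
      · subst hk0; simp [pvPowLoop, pvPw, pvI_mul]
      · simp only [pvPowLoop, hk0, if_false]
        rw [ih (k/2) (by omega)]
        rw [pvPw_sq]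
        by_cases ho : k % 2 = 1
        · rw [if_pos ho]
          rw [← pvMul_assoc, pvPw_mul]
          have h : 2 * (k/2) + 1 = k := by omega
          rw [h]
        · rw [if_neg ho]
          have h : 2 * (k/2) = k := by omega
          rw [h]

-- the two rows of M^k carry (t(k+1), t k) through the start vector (3, 1)
theorem pvPw_entries (k : Nat) :
    3 * (pvPw pvMM k).a + (pvPw pvMM k).b = pvT (k+1) ∧
    3 * (pvPw pvMM k).c + (pvPw pvMM k).d = pvT k := by
  induction k with
  | zero => constructor <;> rfl
  | succ k ih =>
      obtain ⟨h1, h2⟩ := ih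
      simp only [pvMM] at h1 h2
      constructor
      · show 3 * (pvMul pvMM (pvPw pvMM k)).a + (pvMul pvMM (pvPw pvMM k)).b = pvT (k+2)
        simp only [pvMul, pvMM, pvT]
        linarith
      · show 3 * (pvMul pvMM (pvPw pvMM k)).c + (pvMul pvMM (pvPw pvMM k)).d = pvT (k+1)
        simp only [pvMul, pvMM]
        linarith

theorem alt_eq_pvT (N : Nat) (hn : 1 ≤ N) :
    calcadas_sem_amarelas_consecutivas_alt (N : Int) = pvT N := by
  have hne : (N : Int) ≠ 0 := by omega
  unfold calcadas_sem_amarelas_consecutivas_alt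
  simp only [hne, if_false]
  have hk : ((N : Int) - 1).toNat = N - 1 := by omega
  rw [hk]
  rw [pvPowLoop_eq (N-1) (N-1) le_rfl]
  rw [show (⟨1,0,0,1⟩ : PvM) = pvI from rfl, show (⟨2,2,1,0⟩ : PvM) = pvMM from rfl, pvMul_I]
  have h := (pvPw_entries (N-1)).1
  rwa [show N - 1 + 1 = N by omega] at h

-- dp-row relation to t
theorem pvGY_eq_pvT (k : Nat) :
    (pvGY (k+2)).1 = pvT (k+1) ∧ (pvGY (k+2)).2 = 2 * pvT k := by
  induction k with
  | zero => constructor <;> rfl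
  | succ k ih =>
      obtain ⟨h1, h2⟩ := ih
      constructor
      · show 2 * (pvGY (k+2)).1 + (pvGY (k+2)).2 = pvT (k+2)
        rw [h1, h2]; show 2 * pvT (k+1) + 2 * pvT k = pvT (k+2); rfl
      · show 2 * (pvGY (k+2)).1 = 2 * pvT (k+1)
        rw [h1]

-- the intended contents of dp row k after the loop has processed i = 2..m
def pvRowV (m k : Nat) : List Int :=
  if 1 ≤ k ∧ k ≤ m then [(pvGY k).1, (pvGY k).1, (pvGY k).2] else [0, 0, 0]

theorem getD_set_self (dp : List (List Int)) (i : Nat) (h : i < dp.length) (r : List Int) :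
    (dp.set i r).getD i [] = r := by
  simp [List.getD_eq_getElem?_getD, h]

theorem getElemD_set_self (dp : List (List Int)) (i : Nat) (h : i < dp.length) (r : List Int) :
    ((dp.set i r)[i]?).getD [] = r := by
  simp [h]

theorem getD_set_ne (dp : List (List Int)) (i k : Nat) (h : k ≠ i) (r : List Int) :
    (dp.set i r).getD k [] = dp.getD k [] := by
  simp [List.getD_eq_getElem?_getD, List.getElem?_set_ne (by omega : i ≠ k)]

-- invariant transfer for one loop iteration at i = m+1
theorem stepA_inv (N m : Nat) (dp : List (List Int))
    (hlen : dp.length = N + 1) (hm1 : 1 ≤ m) (hmN : m + 1 ≤ N)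
    (hrows : ∀ k, k ≤ N → dp.getD k [] = pvRowV m k) :
    (pvStepA dp (m+1)).length = N + 1 ∧
    ∀ k, k ≤ N → (pvStepA dp (m+1)).getD k [] = pvRowV (m+1) k := by
  have hiN : m + 1 < dp.length := by omega
  have hrow_m : dp.getD m [] = [(pvGY m).1, (pvGY m).1, (pvGY m).2] := by
    rw [hrows m (by omega)]
    simp [pvRowV, hm1]
  have hrow_i : dp.getD (m+1) [] = [0, 0, 0] := by
    rw [hrows (m+1) hmN]
    simp [pvRowV]
  have hstep : pvStepA dp (m+1)
      = dp.set (m+1) [(pvGY (m+1)).1, (pvGY (m+1)).1, (pvGY (m+1)).2] := by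
    obtain ⟨m', rfl⟩ : ∃ m', m = m' + 1 := ⟨m - 1, by omega⟩
    have hGY : pvGY (m'+2)
        = ((pvGY (m'+1)).1 + (pvGY (m'+1)).1 + (pvGY (m'+1)).2,
           (pvGY (m'+1)).1 + (pvGY (m'+1)).1) := by
      simp only [pvGY, Prod.mk.injEq]
      constructor <;> ring
    simp only [pvStepA, pvSetA, pvCellA, Nat.add_sub_cancel]
    rw [hrow_m, hrow_i]
    simp only [List.getD_cons_zero, List.getD_cons_succ, List.set_set,
      getD_set_self dp (m'+1+1) hiN, getD_set_ne dp (m'+1+1) (m'+1) (by omega)]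
    rw [hrow_m, hGY]
    simp only [List.getD_cons_zero, List.getD_cons_succ, List.set_cons_zero, List.set_cons_succ]
  rw [hstep]
  refine ⟨by simp [hlen], ?_⟩
  intro k hk
  by_cases hki : k = m + 1
  · subst hki
    rw [getD_set_self dp (m+1) hiN]
    simp [pvRowV]
  · rw [getD_set_ne dp (m+1) k hki, hrows k hk]
    unfold pvRowV
    by_cases h1 : 1 ≤ k ∧ k ≤ m
    · have h2 : 1 ≤ k ∧ k ≤ m + 1 := by omega
      simp [h1, h2]
    · have h2 : ¬ (1 ≤ k ∧ k ≤ m + 1) := by omega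
      simp [h1, h2]

-- the initial table (after dp[1][j] = 1, j = 0,1,2)
def pvDP1 (N : Nat) : List (List Int) :=
  pvSetA (pvSetA (pvSetA (List.replicate (N+1) [0, 0, 0]) 1 0 1) 1 1 1) 1 2 1

theorem dp1_eq (N : Nat) (hN : 1 ≤ N) :
    pvDP1 N = (List.replicate (N+1) ([0, 0, 0] : List Int)).set 1 [1, 1, 1] := by
  have hlt : 1 < (List.replicate (N+1) ([0, 0, 0] : List Int)).length := by
    simp; omega
  have hrep : (List.replicate (N+1) ([0, 0, 0] : List Int)).getD 1 [] = [0, 0, 0] := by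
    simp [List.getD_eq_getElem?_getD, show 1 < N + 1 by omega]
  unfold pvDP1 pvSetA
  rw [hrep]
  simp [List.set_set, getElemD_set_self _ 1 hlt]

-- whole-loop invariant: after processing i = 2..m the table holds pvRowV m
theorem loopA_inv (N : Nat) (hN1 : 1 ≤ N) :
    ∀ m, 1 ≤ m → m ≤ N →
      (((PySem.List.pyRange 2 ((m : Int)+1) 1).foldl
          (fun d i => pvStepA d i.toNat) (pvDP1 N)).length = N + 1 ∧
       ∀ k, k ≤ N →
        ((PySem.List.pyRange 2 ((m : Int)+1) 1).foldl
          (fun d i => pvStepA d i.toNat) (pvDP1 N)).getD k [] = pvRowV m k) := by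
  intro m hm
  induction m, hm using Nat.le_induction with
  | base =>
    intro hN
    have hc : ((1 : Nat) : Int) + 1 = 2 := by norm_num
    rw [hc, show PySem.List.pyRange 2 2 1 = [] from by decide, List.foldl_nil]
    rw [dp1_eq N hN1]
    have hlt : 1 < (List.replicate (N+1) ([0, 0, 0] : List Int)).length := by simp; omega
    refine ⟨by simp, ?_⟩
    intro k hk
    by_cases hk1 : k = 1
    · subst hk1
      rw [getD_set_self _ 1 hlt]
      simp [pvRowV, pvGY]
    · rw [getD_set_ne _ 1 k hk1]
      have h2 : ¬ (1 ≤ k ∧ k ≤ 1) := by omega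
      simp [List.getD_eq_getElem?_getD, show k < N + 1 by omega, pvRowV, h2]
  | succ m hm ih =>
    intro hmN
    have ihh := ih (by omega)
    have hrange : PySem.List.pyRange 2 (((m+1 : Nat) : Int)+1) 1
        = PySem.List.pyRange 2 ((m : Int)+1) 1 ++ [(m : Int)+1] := by
      rw [show ((m+1 : Nat) : Int) + 1 = ((m : Int)+1)+1 by push_cast; ring]
      exact PySem.List.pyRange_one_succ_right (by omega)
    rw [hrange, List.foldl_append, List.foldl_cons, List.foldl_nil]
    have htn : ((m : Int)+1).toNat = m + 1 := by omega
    rw [htn]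
    exact stepA_inv N m _ ihh.1 (by omega) hmN ihh.2

theorem a_eq_pvT (N : Nat) (h2 : 2 ≤ N) :
    calcadas_sem_amarelas_consecutivas (N : Int) = pvT N := by
  have h0 : (N : Int) ≠ 0 := by omega
  have h1 : (N : Int) ≠ 1 := by omega
  unfold calcadas_sem_amarelas_consecutivas
  simp only [h0, h1, if_false]
  have hcast : ((N : Int) + 1).toNat = N + 1 := by omega
  have htn : ((N : Int)).toNat = N := by omega
  rw [hcast, htn]
  have hinv := loopA_inv N (by omega) N (by omega) le_rfl
  have hrowN := hinv.2 N le_rfl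
  unfold pvDP1 at hrowN
  simp only [pvCellA, hrowN]
  rw [show pvRowV N N = [(pvGY N).1, (pvGY N).1, (pvGY N).2] from by
    simp [pvRowV, show (1 ≤ N ∧ N ≤ N) from ⟨by omega, le_rfl⟩]]
  simp only [List.getD_cons_zero, List.getD_cons_succ]
  obtain ⟨k, rfl⟩ : ∃ k, N = k + 2 := ⟨N - 2, by omega⟩
  obtain ⟨hgy1, hgy2⟩ := pvGY_eq_pvT k
  rw [hgy1, hgy2]
  show pvT (k+1) + pvT (k+1) + 2 * pvT k = 2 * pvT (k+1) + 2 * pvT k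
  ring

-- ===== VERDICT (by name: the statement is the Claim_ definition above) =====
theorem calcadas_sem_amarelas_consecutivas_spec : Claim_equal_calcadas_sem_amarelas_consecutivas := by
  intro n _ hpre
  unfold Spec_calcadas_sem_amarelas_consecutivas
  unfold Pre_calcadas_sem_amarelas_consecutivas at hpre
  obtain ⟨N, rfl⟩ : ∃ N : Nat, n = (N : Int) := ⟨n.toNat, by omega⟩
  by_cases hN0 : N = 0
  · subst hN0; decide
  by_cases hN1 : N = 1
  · subst hN1; rw [alt_eq_pvT 1 le_rfl]; decide
  obtain ⟨k, rfl⟩ : ∃ k, N = k + 2 := ⟨N - 2, by omega⟩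
  rw [a_eq_pvT (k+2) (by omega), alt_eq_pvT (k+2) (by omega)]
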